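-- pv_equiv track=rewrite | github.com/Jordan-Burgess/LeetCode-Practice | count-the-photos/count-the-photos.py | count_photos
-- ===== SOURCE A (Python) =====
-- def count_photos(road):
--     right = 0
--     camera = 0
--     count = 0
--
--     for i in road:
--         # Keeps track of right cars
--         if i == '>':
--             right += 1
--         # Keeps track of cameras(left_cars) / Add all the right cars that pass
--         elif i == '.':
--             count += right
--             camera += 1
--         # Adds all the left cars that will pass the cameras we kept track of.
--         elif i == '<':
--             count += camera
--
--     return count
-- ===== SOURCE B (Python) =====
-- def count_photos(road):
--     # pass 1: right-moving cars photographed at later cameras ('.')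
--     gt = 0
--     c1 = 0
--     for ch in road:
--         if ch == '>':
--             gt += 1
--         elif ch == '.':
--             c1 += gt
--     # pass 2: left-moving cars ('<') photographed by earlier cameras
--     dots = 0
--     c2 = 0
--     for ch in road:
--         if ch == '.':
--             dots += 1
--         elif ch == '<':
--             c2 += dots
--     return c1 + c2
-- ===== Notes on version B (the rewrite author's own statement) =====
-- stated objective: alternative
-- what changed: Replaced A's single pass carrying three interleaved counters by two independent linear passes, one per pair type: pass 1 sums the running '>' count at each '.', pass 2 sums the running '.' count at each '<', and the result is the sum of the two accumulators.
import Mathlib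
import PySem

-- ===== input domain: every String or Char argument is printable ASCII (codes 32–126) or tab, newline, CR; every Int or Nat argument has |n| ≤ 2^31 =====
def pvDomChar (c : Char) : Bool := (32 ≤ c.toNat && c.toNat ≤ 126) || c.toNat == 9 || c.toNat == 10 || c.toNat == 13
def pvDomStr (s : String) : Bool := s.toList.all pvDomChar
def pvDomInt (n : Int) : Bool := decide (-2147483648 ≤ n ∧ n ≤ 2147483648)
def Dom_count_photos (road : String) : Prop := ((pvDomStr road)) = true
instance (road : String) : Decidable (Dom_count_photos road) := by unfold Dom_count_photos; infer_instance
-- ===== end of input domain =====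

-- B replaces A's single three-counter pass by two independent passes, one per pair type
-- (objective: alternative decomposition; same O(n) cost).

-- ===== PORT A =====
-- A's single loop over road with state (right, camera, count).
def countPhotosLoopA : List Char → Int → Int → Int → Int
  | [], _, _, count => count
  | i :: rest, right, camera, count =>
    if i = '>' then countPhotosLoopA rest (right + 1) camera count
    else if i = '.' then countPhotosLoopA rest right (camera + 1) (count + right)
    else if i = '<' then countPhotosLoopA rest right camera (count + camera)
    else countPhotosLoopA rest right camera count

def count_photos (road : String) : Int :=
  countPhotosLoopA road.toList 0 0 0

-- ===== PORT B =====
-- pass 1: running '>' count gt, accumulator c1 bumped at each '.'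
def countPhotosPass1 : List Char → Int → Int → Int
  | [], _, c1 => c1
  | ch :: rest, gt, c1 =>
    if ch = '>' then countPhotosPass1 rest (gt + 1) c1
    else if ch = '.' then countPhotosPass1 rest gt (c1 + gt)
    else countPhotosPass1 rest gt c1

-- pass 2: running '.' count dots, accumulator c2 bumped at each '<'
def countPhotosPass2 : List Char → Int → Int → Int
  | [], _, c2 => c2
  | ch :: rest, dots, c2 =>
    if ch = '.' then countPhotosPass2 rest (dots + 1) c2
    else if ch = '<' then countPhotosPass2 rest dots (c2 + dots)
    else countPhotosPass2 rest dots c2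

def count_photos_alt (road : String) : Int :=
  countPhotosPass1 road.toList 0 0 + countPhotosPass2 road.toList 0 0

-- ===== PRECONDITION & SPEC =====
def Spec_count_photos (road : String) (out : Int) : Prop := out = count_photos_alt road
instance (road : String) (out : Int) : Decidable (Spec_count_photos road out) := by unfold Spec_count_photos; infer_instance

-- ===== CLAIM (what is proved, stated in full; the proofs are below) =====
def Claim_equal_count_photos : Prop := ∀ (road : String), Dom_count_photos road → Spec_count_photos road (count_photos road)

-- ===== LEMMAS AND PROOFS =====
theorem countPhotosLoopA_eq (l : List Char) (r cam cnt : Int) :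
    countPhotosLoopA l r cam cnt = cnt + countPhotosPass1 l r 0 + countPhotosPass2 l cam 0 := by
  induction l generalizing r cam cnt with
  | nil => simp [countPhotosLoopA, countPhotosPass1, countPhotosPass2]
  | cons c rest ih =>
    have shift1 : ∀ (l : List Char) (g a : Int),
        countPhotosPass1 l g a = a + countPhotosPass1 l g 0 := by
      intro l
      induction l with
      | nil => intro g a; simp [countPhotosPass1]
      | cons x xs ihx =>
        intro g a
        simp only [countPhotosPass1]
        split_ifs with h1 h2
        · exact ihx (g + 1) a
        · rw [ihx g (a + g), ihx g (0 + g)]; ring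
        · exact ihx g a
    have shift2 : ∀ (l : List Char) (d a : Int),
        countPhotosPass2 l d a = a + countPhotosPass2 l d 0 := by
      intro l
      induction l with
      | nil => intro d a; simp [countPhotosPass2]
      | cons x xs ihx =>
        intro d a
        simp only [countPhotosPass2]
        split_ifs with h1 h2
        · exact ihx (d + 1) a
        · rw [ihx d (a + d), ihx d (0 + d)]; ring
        · exact ihx d a
    simp only [countPhotosLoopA, countPhotosPass1, countPhotosPass2]
    by_cases h1 : c = '>'
    · subst h1; simp only [reduceIte, Char.reduceEq]
      rw [ih]
    · by_cases h2 : c = '.'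
      · subst h2; simp only [reduceIte, Char.reduceEq]
        rw [ih, shift1 rest r (0 + r)]; ring
      · by_cases h3 : c = '<'
        · subst h3; simp only [reduceIte, Char.reduceEq]
          rw [ih, shift2 rest cam (0 + cam)]; ring
        · simp only [h1, h2, h3, if_false]
          rw [ih]

-- ===== VERDICT (by name: the statement is the Claim_ definition above) =====
theorem count_photos_spec : Claim_equal_count_photos := by
  intro road _
  unfold Spec_count_photos count_photos count_photos_alt
  simpa using countPhotosLoopA_eq road.toList 0 0 0
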